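-- pv_equiv track=rewrite | github.com/MrBrantCode/unitest_baseline | mut_generate/mist_train_cf/cf_74358/solution.py | second_smallest_odd_and_second_largest_even
-- ===== SOURCE A (Python) =====
-- def second_smallest_odd_and_second_largest_even(l: list):
--     min1, min2, max1, max2 = float('inf'), float('inf'), -float('inf'), -float('inf')
--     odd_count, even_count = 0, 0
--
--     for x in l:
--         if x % 2 != 0:
--             odd_count += 1
--             if x < min1:
--                 min2 = min1
--                 min1 = x
--             elif x < min2:
--                 min2 = x
--         else:
--             even_count += 1
--             if x > max1:
--                 max2 = max1
--                 max1 = x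
--             elif x > max2:
--                 max2 = x
--
--     res = [min2 if odd_count > 1 else None, max2 if even_count > 1 else None]
--     return tuple(res)
-- ===== SOURCE B (Python) =====
-- def second_smallest_odd_and_second_largest_even(l: list):
--     odds = sorted([x for x in l if x % 2 != 0])
--     evens = sorted([x for x in l if x % 2 == 0])
--     return (odds[1] if len(odds) > 1 else None,
--             evens[-2] if len(evens) > 1 else None)
-- ===== Notes on version B (the rewrite author's own statement) =====
-- stated objective: simpler
-- what changed: Replaces the single-pass four-register running-extrema tracking with a partition-sort-index strategy: split the list into odds and evens, sort each ascending, and read the second smallest odd and the second largest even directly off the sorted partitions.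
import Mathlib
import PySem

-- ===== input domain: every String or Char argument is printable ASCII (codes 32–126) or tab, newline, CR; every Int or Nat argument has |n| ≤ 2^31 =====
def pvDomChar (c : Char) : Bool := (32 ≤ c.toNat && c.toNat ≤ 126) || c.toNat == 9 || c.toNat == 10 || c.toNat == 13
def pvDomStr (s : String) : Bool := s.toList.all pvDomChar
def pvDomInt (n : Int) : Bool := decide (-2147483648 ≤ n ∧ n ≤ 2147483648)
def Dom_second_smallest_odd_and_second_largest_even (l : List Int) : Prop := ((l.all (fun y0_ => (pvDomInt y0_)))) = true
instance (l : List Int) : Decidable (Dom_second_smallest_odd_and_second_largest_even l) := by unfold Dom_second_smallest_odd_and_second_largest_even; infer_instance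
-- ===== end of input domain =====

-- B replaces A's single-pass four-register extrema tracking by partition + sort + index (simpler decomposition, not faster).

-- ===== PORT A =====
-- float('inf') / -float('inf') are modelled by `none` in `Option Int` (none = +inf for the mins,
-- none = -inf for the maxes); this is exact because the inputs are Ints and the infinities only
-- ever act as comparison sentinels (a returned min2/max2 is guarded by the count > 1, so a
-- returned value is never the sentinel).
def pvLtInf (x : Int) : Option Int → Bool
  | none => true
  | some v => decide (x < v)

def pvGtNinf (x : Int) : Option Int → Bool
  | none => true
  | some v => decide (v < x)

def pvStepA (s : Option Int × Option Int × Option Int × Option Int × Int × Int) (x : Int) :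
    Option Int × Option Int × Option Int × Option Int × Int × Int :=
  let (min1, min2, max1, max2, oc, ec) := s
  if PySem.Int.mod x 2 ≠ 0 then
    if pvLtInf x min1 then (some x, min1, max1, max2, oc + 1, ec)
    else if pvLtInf x min2 then (min1, some x, max1, max2, oc + 1, ec)
    else (min1, min2, max1, max2, oc + 1, ec)
  else
    if pvGtNinf x max1 then (min1, min2, some x, max1, oc, ec + 1)
    else if pvGtNinf x max2 then (min1, min2, max1, some x, oc, ec + 1)
    else (min1, min2, max1, max2, oc, ec + 1)

def second_smallest_odd_and_second_largest_even (l : List Int) : Option Int × Option Int :=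
  let (_, min2, _, max2, oc, ec) := l.foldl pvStepA (none, none, none, none, 0, 0)
  ((if oc > 1 then min2 else none), (if ec > 1 then max2 else none))

-- ===== PORT B =====
def second_smallest_odd_and_second_largest_even_alt (l : List Int) : Option Int × Option Int :=
  let odds := PySem.List.sorted (l.filter (fun x => PySem.Int.mod x 2 ≠ 0)) (fun x => x) false
  let evens := PySem.List.sorted (l.filter (fun x => !(PySem.Int.mod x 2 ≠ 0))) (fun x => x) false
  ((if 1 < (odds.length : Int) then PySem.List.pyGet? odds 1 else none),
   (if 1 < (evens.length : Int) then PySem.List.pyGet? evens (-2) else none))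

-- ===== PRECONDITION & SPEC =====
def Spec_second_smallest_odd_and_second_largest_even (l : List Int) (out : Option Int × Option Int) : Prop := out = second_smallest_odd_and_second_largest_even_alt l
instance (l : List Int) (out : Option Int × Option Int) : Decidable (Spec_second_smallest_odd_and_second_largest_even l out) := by unfold Spec_second_smallest_odd_and_second_largest_even; infer_instance

-- ===== CLAIM (what is proved, stated in full; the proofs are below) =====
def Claim_equal_second_smallest_odd_and_second_largest_even : Prop := ∀ (l : List Int), Dom_second_smallest_odd_and_second_largest_even l → Spec_second_smallest_odd_and_second_largest_even l (second_smallest_odd_and_second_largest_even l)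

-- ===== LEMMAS AND PROOFS =====

-- the odd-side (running two smallest) step, in isolation
def pvStepO (s : Option Int × Option Int) (x : Int) : Option Int × Option Int :=
  if pvLtInf x s.1 then (some x, s.1)
  else if pvLtInf x s.2 then (s.1, some x)
  else s

def pvNegP (s : Option Int × Option Int) : Option Int × Option Int :=
  (s.1.map Neg.neg, s.2.map Neg.neg)

lemma pvNegP_negP (s : Option Int × Option Int) : pvNegP (pvNegP s) = s := by
  rcases s with ⟨a, b⟩
  rcases a <;> rcases b <;> simp [pvNegP]

-- the even-side (running two largest) step is the odd-side step conjugated by negation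
lemma pvStepE_eq (m1 m2 M1 M2 : Option Int) (oc ec : Int) (x : Int)
    (h : ¬ PySem.Int.mod x 2 ≠ 0) :
    pvStepA (m1, m2, M1, M2, oc, ec) x =
      (m1, m2, (pvNegP (pvStepO (pvNegP (M1, M2)) (-x))).1,
       (pvNegP (pvStepO (pvNegP (M1, M2)) (-x))).2, oc, ec + 1) := by
  simp only [pvStepA]
  rw [if_neg h]
  rcases M1 with _ | a <;> rcases M2 with _ | b <;>
    simp only [pvStepO, pvNegP, pvLtInf, pvGtNinf, Option.map_some, Option.map_none] <;>
    split_ifs <;> simp_all <;> omega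

lemma pvStepA_odd (m1 m2 M1 M2 : Option Int) (oc ec : Int) (x : Int)
    (h : PySem.Int.mod x 2 ≠ 0) :
    pvStepA (m1, m2, M1, M2, oc, ec) x =
      ((pvStepO (m1, m2) x).1, (pvStepO (m1, m2) x).2, M1, M2, oc + 1, ec) := by
  simp only [pvStepA, pvStepO]
  rw [if_pos h]
  by_cases h1 : pvLtInf x m1 <;> by_cases h2 : pvLtInf x m2 <;> simp [h1, h2]

-- the six-component fold splits into the odd-side fold, the (negated) even-side fold and counts
lemma pvFold_split (l : List Int) : ∀ (m1 m2 M1 M2 : Option Int) (oc ec : Int),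
    l.foldl pvStepA (m1, m2, M1, M2, oc, ec) =
      (((l.filter (fun x => PySem.Int.mod x 2 ≠ 0)).foldl pvStepO (m1, m2)).1,
       ((l.filter (fun x => PySem.Int.mod x 2 ≠ 0)).foldl pvStepO (m1, m2)).2,
       (pvNegP (((l.filter (fun x => !(PySem.Int.mod x 2 ≠ 0))).map Neg.neg).foldl pvStepO (pvNegP (M1, M2)))).1,
       (pvNegP (((l.filter (fun x => !(PySem.Int.mod x 2 ≠ 0))).map Neg.neg).foldl pvStepO (pvNegP (M1, M2)))).2,
       oc + (l.filter (fun x => PySem.Int.mod x 2 ≠ 0)).length,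
       ec + (l.filter (fun x => !(PySem.Int.mod x 2 ≠ 0))).length) := by
  induction l with
  | nil =>
    intro m1 m2 M1 M2 oc ec
    rcases M1 with _ | a <;> rcases M2 with _ | b <;> simp [pvNegP]
  | cons x t ih =>
    intro m1 m2 M1 M2 oc ec
    by_cases h : PySem.Int.mod x 2 ≠ 0
    · have hd : decide (PySem.Int.mod x 2 ≠ 0) = true := by simpa using h
      rw [List.foldl_cons, pvStepA_odd m1 m2 M1 M2 oc ec x h, ih]
      simp only [List.filter_cons, hd, Bool.not_true, ite_true, ite_false,
        List.foldl_cons, List.length_cons, Prod.mk.injEq]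
      and_intros <;> first | trivial | omega
    · have hd : decide (PySem.Int.mod x 2 ≠ 0) = false := by simpa using h
      rw [List.foldl_cons, pvStepE_eq m1 m2 M1 M2 oc ec x h, ih]
      have hO : ((pvNegP (pvStepO (pvNegP (M1, M2)) (-x))).1,
          (pvNegP (pvStepO (pvNegP (M1, M2)) (-x))).2) =
          pvNegP (pvStepO (pvNegP (M1, M2)) (-x)) := rfl
      simp only [List.filter_cons, hd, Bool.not_false, ite_true, ite_false,
        List.map_cons, List.foldl_cons, List.length_cons, Prod.mk.injEq, pvNegP_negP, hO]
      and_intros <;> first | trivial | omega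

-- pvStepO commutes with itself (right-commutativity, for permutation invariance of the fold)
lemma pvStepO_comm : ∀ (s : Option Int × Option Int) (x y : Int),
    pvStepO (pvStepO s x) y = pvStepO (pvStepO s y) x := by
  intro s x y
  rcases s with ⟨a, b⟩
  rcases a with _ | a <;> rcases b with _ | b <;>
    simp [pvStepO, pvLtInf] <;> split_ifs <;> simp_all <;> omega

lemma pvFoldO_absorb : ∀ (t : List Int) (a b : Int),
    (∀ y ∈ t, a ≤ y) → (∀ y ∈ t, b ≤ y) →
    t.foldl pvStepO (some a, some b) = (some a, some b) := by
  intro t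
  induction t with
  | nil => intro a b _ _; rfl
  | cons y t ih =>
    intro a b ha hb
    have h1 : ¬ y < a := not_lt.mpr (ha y (by simp))
    have h2 : ¬ y < b := not_lt.mpr (hb y (by simp))
    simp only [List.foldl_cons, pvStepO, pvLtInf, h1, h2, decide_false, if_false]
    exact ih a b (fun z hz => ha z (by simp [hz])) (fun z hz => hb z (by simp [hz]))

lemma pvFoldO_one : ∀ (t : List Int) (a : Int),
    (∀ y ∈ t, a ≤ y) → t.Pairwise (· ≤ ·) →
    t.foldl pvStepO (some a, none) = (some a, t[0]?) := by
  intro t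
  cases t with
  | nil => intro a _ _; rfl
  | cons b t =>
    intro a ha hp
    have h1 : ¬ b < a := not_lt.mpr (ha b (by simp))
    simp only [List.foldl_cons, pvStepO, pvLtInf, h1, decide_false, if_false, if_true]
    rw [List.pairwise_cons] at hp
    have := pvFoldO_absorb t a b
      (fun z hz => le_trans (ha b (by simp)) (hp.1 z hz)) (fun z hz => hp.1 z hz)
    simp_all

-- the odd-side fold on an ascending list returns its first two elements
lemma pvFoldO_sorted (t : List Int) (hp : t.Pairwise (· ≤ ·)) :
    t.foldl pvStepO (none, none) = (t[0]?, t[1]?) := by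
  cases t with
  | nil => rfl
  | cons a t =>
    rw [List.pairwise_cons] at hp
    simp only [List.foldl_cons, pvStepO, pvLtInf, if_true]
    rw [pvFoldO_one t a hp.1 hp.2]
    simp

lemma pvFoldO_perm {t t' : List Int} (h : t.Perm t') (s : Option Int × Option Int) :
    t.foldl pvStepO s = t'.foldl pvStepO s :=
  @List.Perm.foldl_eq _ _ pvStepO _ _ ⟨pvStepO_comm⟩ h s

-- Python xs[-2] is the second element of the reversed list
lemma pvGet_neg_two (xs : List Int) : PySem.List.pyGet? xs (-2) = xs.reverse[1]? := by
  simp only [PySem.List.pyGet?, PySem.List.pyIdx?]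
  by_cases h : 2 ≤ xs.length
  · rw [if_neg (by omega : ¬ (0:Int) ≤ -2), if_pos (by push_cast; omega : -(xs.length:Int) ≤ -2)]
    simp only [Option.bind_some]
    rw [List.getElem?_reverse (by omega : 1 < xs.length)]
    congr 1
    all_goals omega
  · rw [if_neg (by omega : ¬ (0:Int) ≤ -2), if_neg (by push_cast; omega : ¬ -(xs.length:Int) ≤ -2)]
    have hn : (Option.bind (none : Option Nat) fun k => xs[k]?) = none := rfl
    rw [hn]
    exact (List.getElem?_eq_none (by simp; omega)).symm

lemma pvGet_one (xs : List Int) : PySem.List.pyGet? xs 1 = xs[1]? := by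
  simp only [PySem.List.pyGet?, PySem.List.pyIdx?]
  rw [if_pos (by omega : (0:Int) ≤ 1)]
  by_cases h : 1 < xs.length
  · rw [if_pos (by exact_mod_cast h : (1:Int) < (xs.length:Int))]
    rfl
  · rw [if_neg (by push_cast; omega : ¬ (1:Int) < (xs.length:Int))]
    exact (List.getElem?_eq_none (by omega)).symm

-- sorted (with identity key) of the negated list is the negated reversed sorted list
lemma pvSorted_neg (xs : List Int) :
    PySem.List.sorted (xs.map Neg.neg) (fun x => x) false =
      (PySem.List.sorted xs (fun x => x) false).reverse.map Neg.neg := by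
  apply PySem.List.sorted_id_eq_of_perm_of_pairwise
  · exact List.Perm.map Neg.neg ((List.reverse_perm _).trans (PySem.List.sorted_perm xs (fun x => x) false))
  · have hp : (PySem.List.sorted xs (fun x => x) false).Pairwise (· ≤ ·) :=
      PySem.List.sorted_pairwise xs (fun x => x)
    rw [List.pairwise_map, List.pairwise_reverse]
    exact hp.imp (by intro a b h; omega)

-- ===== VERDICT (by name: the statement is the Claim_ definition above) =====
theorem second_smallest_odd_and_second_largest_even_spec : Claim_equal_second_smallest_odd_and_second_largest_even := by
  intro l _
  unfold Spec_second_smallest_odd_and_second_largest_even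
  unfold second_smallest_odd_and_second_largest_even second_smallest_odd_and_second_largest_even_alt
  rw [pvFold_split l none none none none 0 0]
  set odds := l.filter (fun x => PySem.Int.mod x 2 ≠ 0) with hodds
  set evens := l.filter (fun x => !(PySem.Int.mod x 2 ≠ 0)) with hevens
  set so := PySem.List.sorted odds (fun x => x) false with hso
  set se := PySem.List.sorted evens (fun x => x) false with hse
  have hsoP : so.Pairwise (· ≤ ·) := PySem.List.sorted_pairwise odds (fun x => x)
  have hseP : se.Pairwise (· ≤ ·) := PySem.List.sorted_pairwise evens (fun x => x)
  have hO : odds.foldl pvStepO (none, none) = (so[0]?, so[1]?) := by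
    rw [pvFoldO_perm (PySem.List.sorted_perm odds (fun x => x) false).symm]
    exact pvFoldO_sorted so hsoP
  have hE : (evens.map Neg.neg).foldl pvStepO (none, none) =
      ((se.reverse.map Neg.neg)[0]?, (se.reverse.map Neg.neg)[1]?) := by
    rw [pvFoldO_perm (t' := PySem.List.sorted (evens.map Neg.neg) (fun x => x) false)
        (PySem.List.sorted_perm _ (fun x => x) false).symm]
    rw [pvSorted_neg]
    exact pvFoldO_sorted _ (by
      rw [List.pairwise_map, List.pairwise_reverse]
      exact hseP.imp (by intro a b h; omega))
  simp only [pvNegP, Option.map_none] at *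
  rw [hO, hE]
  simp only [Prod.mk.injEq]
  have hlenso : so.length = odds.length := PySem.List.length_sorted odds (fun x => x) false
  have hlense : se.length = evens.length := PySem.List.length_sorted evens (fun x => x) false
  constructor
  · -- odd component
    rw [pvGet_one]
    by_cases h : 1 < odds.length
    · rw [if_pos (by push_cast; omega : (0:Int) + odds.length > 1),
         if_pos (by rw [hlenso]; push_cast; omega : (1:Int) < (so.length:Int))]
    · rw [if_neg (by push_cast; omega : ¬ (0:Int) + odds.length > 1),
         if_neg (by rw [hlenso]; push_cast; omega : ¬ (1:Int) < (so.length:Int))]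
  · -- even component
    rw [pvGet_neg_two]
    have hget : (se.reverse.map Neg.neg)[1]?.map Neg.neg = se.reverse[1]? := by
      rw [List.getElem?_map]
      cases h : se.reverse[1]? <;> simp [h]
    rw [hget]
    by_cases h : 1 < evens.length
    · rw [if_pos (by push_cast; omega : (0:Int) + evens.length > 1),
         if_pos (by rw [hlense]; push_cast; omega : (1:Int) < (se.length:Int))]
    · rw [if_neg (by push_cast; omega : ¬ (0:Int) + evens.length > 1),
         if_neg (by rw [hlense]; push_cast; omega : ¬ (1:Int) < (se.length:Int))]
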